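-- pv_equiv track=rewrite | github.com/Flyns157/power4 | SAE_vf.py | colonne4
-- ===== SOURCE A (Python) =====
-- def colonne4(L : list[list[str]], j  : int) -> bool:
--     for i in range(len(L)):
--         n=0
--         for k in L[i]:
--             n=n+1 if k==["rouge","jaune","fond"][j] else 0
--             if n==4:
--                 return True
--     return False
-- ===== SOURCE B (Python) =====
-- def colonne4(L : list[list[str]], j  : int) -> bool:
--     return any('xxxx' in ''.join('x' if c == ["rouge", "jaune", "fond"][j] else ' ' for c in row)
--                for row in L)
-- ===== Notes on version B (the rewrite author's own statement) =====
-- stated objective: idiomatic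
-- what changed: Replaced the nested running-counter loops with a per-row substring test: each row is mapped to a string of 'x'/' ' marks and 'xxxx' in it is checked under any().
import Mathlib
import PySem

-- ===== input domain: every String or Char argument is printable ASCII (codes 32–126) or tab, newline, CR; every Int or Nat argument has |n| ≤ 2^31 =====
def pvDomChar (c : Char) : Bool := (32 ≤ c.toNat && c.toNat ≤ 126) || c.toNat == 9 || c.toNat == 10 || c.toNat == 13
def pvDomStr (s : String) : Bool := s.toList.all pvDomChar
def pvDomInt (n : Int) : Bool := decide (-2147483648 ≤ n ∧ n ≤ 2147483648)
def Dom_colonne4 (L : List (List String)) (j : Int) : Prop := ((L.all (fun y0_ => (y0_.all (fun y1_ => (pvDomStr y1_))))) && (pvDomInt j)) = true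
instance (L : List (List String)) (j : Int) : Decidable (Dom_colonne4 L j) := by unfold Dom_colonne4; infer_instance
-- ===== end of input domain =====

-- B replaces A's running-counter nested loops by an any() over rows of a substring test
-- ('xxxx' in the row mapped to 'x'/' ' marks); return values agree, objective: idiomatic.

-- ===== PORT A =====
-- the literal list ["rouge","jaune","fond"] indexed per cell
def pvColors : List String := ["rouge", "jaune", "fond"]

-- inner 'for k in L[i]' loop with its counter n; the [..][j] lookup happens per cell,
-- none = IndexError (A raises; such inputs are outside Pre_)
def pvRowScan (j : Int) (n : Nat) : List String → Bool
  | [] => false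
  | k :: rest =>
    match PySem.List.pyGet? pvColors j with
    | none => false
    | some t =>
      let n' := if k == t then n + 1 else 0
      if n' == 4 then true else pvRowScan j n' rest

def colonne4 (L : List (List String)) (j : Int) : Bool :=
  L.any (fun row => pvRowScan j 0 row)

-- ===== PORT B =====
-- 'x' if c == ["rouge","jaune","fond"][j] else ' '  (lookup per cell, as in Source B)
def pvMark (j : Int) (c : String) : Char :=
  match PySem.List.pyGet? pvColors j with
  | none => ' '   -- Python raises IndexError here; outside Pre_
  | some t => if c == t then 'x' else ' '

-- Python's "'xxxx' in s": left-to-right substring scan for the fixed pattern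
def pvHasXXXX : List Char → Bool
  | a :: b :: c :: d :: rest =>
    if a == 'x' && b == 'x' && c == 'x' && d == 'x' then true
    else pvHasXXXX (b :: c :: d :: rest)
  | _ => false

def colonne4_alt (L : List (List String)) (j : Int) : Bool :=
  L.any (fun row => pvHasXXXX (row.map (pvMark j)))

-- ===== PRECONDITION & SPEC =====
-- Pre_ excludes exactly the inputs where Python A raises IndexError on the
-- colour-list lookup: j outside [-3,3) while some row is non-empty.
def Pre_colonne4 (L : List (List String)) (j : Int) : Prop :=
  (-3 ≤ j ∧ j < 3) ∨ ∀ row ∈ L, row = []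
instance (L : List (List String)) (j : Int) : Decidable (Pre_colonne4 L j) := by
  unfold Pre_colonne4; infer_instance

def pvWitness_colonne4 : List (List String) × Int := ([["rouge", "jaune"]], 0)

def Spec_colonne4 (L : List (List String)) (j : Int) (out : Bool) : Prop := out = colonne4_alt L j
instance (L : List (List String)) (j : Int) (out : Bool) : Decidable (Spec_colonne4 L j out) := by unfold Spec_colonne4; infer_instance

-- ===== CLAIM (what is proved, stated in full; the proofs are below) =====
def Claim_equal_colonne4 : Prop := ∀ (L : List (List String)) (j : Int), Dom_colonne4 L j → Pre_colonne4 L j → Spec_colonne4 L j (colonne4 L j)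

-- ===== LEMMAS AND PROOFS =====

-- dropping a non-'x' head does not affect the search
lemma hasXXXX_cons_nonx (a : Char) (l : List Char) (ha : a ≠ 'x') :
    pvHasXXXX (a :: l) = pvHasXXXX l := by
  match l with
  | [] => simp [pvHasXXXX]
  | [b] => simp [pvHasXXXX]
  | [b, c] => simp [pvHasXXXX]
  | b :: c :: d :: rest =>
    simp only [pvHasXXXX]
    have : (a == 'x') = false := by simpa using ha
    simp [this]

-- a list with no 'x' never matches
lemma hasXXXX_no_x (l : List Char) (h : ∀ c ∈ l, c ≠ 'x') : pvHasXXXX l = false := by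
  induction l with
  | nil => simp [pvHasXXXX]
  | cons a rest ih =>
    rw [hasXXXX_cons_nonx a rest (h a (by simp))]
    exact ih (fun c hc => h c (by simp [hc]))

-- peeling the run prefix followed by a blank, for each n ≤ 3
lemma hasXXXX_space (cs : List Char) : pvHasXXXX (' ' :: cs) = pvHasXXXX cs :=
  hasXXXX_cons_nonx ' ' cs (by decide)

lemma hasXXXX_x1_space (cs : List Char) :
    pvHasXXXX ('x' :: ' ' :: cs) = pvHasXXXX cs := by
  match cs with
  | [] => simp [pvHasXXXX]
  | [e] => simp [pvHasXXXX]
  | e :: f :: rest => rw [show pvHasXXXX ('x' :: ' ' :: e :: f :: rest)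
        = pvHasXXXX (' ' :: e :: f :: rest) by simp [pvHasXXXX]]
                      exact hasXXXX_space _
lemma hasXXXX_x2_space (cs : List Char) :
    pvHasXXXX ('x' :: 'x' :: ' ' :: cs) = pvHasXXXX cs := by
  match cs with
  | [] => simp [pvHasXXXX]
  | e :: rest => rw [show pvHasXXXX ('x' :: 'x' :: ' ' :: e :: rest)
        = pvHasXXXX ('x' :: ' ' :: e :: rest) by simp [pvHasXXXX]]
                 exact hasXXXX_x1_space _
lemma hasXXXX_x3_space (cs : List Char) :
    pvHasXXXX ('x' :: 'x' :: 'x' :: ' ' :: cs) = pvHasXXXX cs := by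
  rw [show pvHasXXXX ('x' :: 'x' :: 'x' :: ' ' :: cs)
        = pvHasXXXX ('x' :: 'x' :: ' ' :: cs) by simp [pvHasXXXX]]
  exact hasXXXX_x2_space _

lemma hasXXXX_repl_space (n : Nat) (hn : n ≤ 3) (cs : List Char) :
    pvHasXXXX (List.replicate n 'x' ++ ' ' :: cs) = pvHasXXXX cs := by
  interval_cases n
  · exact hasXXXX_space cs
  · exact hasXXXX_x1_space cs
  · exact hasXXXX_x2_space cs
  · exact hasXXXX_x3_space cs

lemma hasXXXX_repl (n : Nat) (hn : n ≤ 3) :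
    pvHasXXXX (List.replicate n 'x') = false := by
  interval_cases n <;> decide

-- the key invariant: counter n ↔ n pending 'x' marks before the rest of the row
lemma rowScan_eq_hasXXXX (j : Int) (t : String)
    (ht : PySem.List.pyGet? pvColors j = some t) :
    ∀ (row : List String) (n : Nat), n ≤ 3 →
      pvRowScan j n row = pvHasXXXX (List.replicate n 'x' ++ row.map (pvMark j)) := by
  intro row
  induction row with
  | nil => intro n hn; simp [pvRowScan, hasXXXX_repl n hn]
  | cons k rest ih =>
    intro n hn
    simp only [pvRowScan, ht, List.map_cons, pvMark]
    by_cases hk : k == t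
    · simp only [hk, if_true]
      by_cases h3 : n = 3
      · subst h3
        simp [pvHasXXXX, List.replicate]
      · have hn' : n + 1 ≤ 3 := by omega
        have h4 : (n + 1 == 4) = false := by
          simp only [beq_eq_false_iff_ne]; omega
        rw [h4]
        simp only [Bool.false_eq_true, if_false]
        rw [ih (n + 1) hn']
        congr 1
        rw [show List.replicate (n + 1) 'x' = List.replicate n 'x' ++ ['x'] from
          List.replicate_succ' .. ]
        simp
    · simp only [hk, Bool.false_eq_true, if_false,
        show ((0 : Nat) == 4) = false by decide]
      rw [ih 0 (by omega)]
      simp only [List.replicate, List.nil_append]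
      rw [hasXXXX_repl_space n hn (rest.map (pvMark j))]

lemma rowScan_none (j : Int) (h : PySem.List.pyGet? pvColors j = none) (row : List String) :
    pvRowScan j 0 row = pvHasXXXX (row.map (pvMark j)) := by
  cases row with
  | nil => simp [pvRowScan, pvHasXXXX]
  | cons k rest =>
    rw [show pvRowScan j 0 (k :: rest) = false by simp [pvRowScan, h]]
    rw [hasXXXX_no_x]
    intro c hc
    simp only [List.mem_map] at hc
    obtain ⟨s, _, rfl⟩ := hc
    simp [pvMark, h]

-- ===== VERDICT (by name: the statement is the Claim_ definition above) =====
theorem colonne4_spec : Claim_equal_colonne4 := by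
  intro L j _ _
  unfold Spec_colonne4 colonne4 colonne4_alt
  apply congrArg (List.any L)
  funext row
  cases ht : PySem.List.pyGet? pvColors j with
  | none => exact rowScan_none j ht row
  | some t => simpa using rowScan_eq_hasXXXX j t ht row 0 (by omega)
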